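-- pv_equiv track=rewrite | github.com/alexandraback/datacollection | solutions_5751500831719424_0/Python/liar/problem_1.py | solve
-- ===== SOURCE A (Python) =====
-- def solve(problem):
--     strings = problem
--
--     from itertools import groupby
--     def canonical(s):
--         return "".join(ch for ch, g in groupby(s))
--
--     def group_lengths(s):
--         return [len(list(g)) for ch, g in groupby(s)]
--
--     def moves_count(rs):
--         ans = 0
--         rs = sorted(rs)
--         for i in range(len(rs) // 2):
--             ans += rs[-1 - i] - rs[i]
--         return ans
--
--     canonical_strings = set(canonical(s) for s in strings)
--     if len(canonical_strings) != 1: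
--         return None
--
--     s0 = canonical_strings.pop()
--     gs = [group_lengths(s) for s in strings]
--     ans = 0
--     for i in range(len(s0)):
--         ans += moves_count(g[i] for g in gs)
--     return ans
-- ===== SOURCE B (Python) =====
-- def solve(problem):
--     # Run-length encode each string in one manual pass, compare run-character
--     # patterns against the first string's, then per position use quickselect
--     # (median) and sum absolute deviations instead of sorting and pairing ends.
--     if not problem:
--         return None
--
--     def runs(s):
--         out = []
--         for ch in s:
--             if out and out[-1][0] == ch:
--                 out[-1][1] += 1
--             else:
--                 out.append([ch, 1])
--         return out
--
--     rss = [runs(s) for s in problem]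
--     pattern = [c for c, _ in rss[0]]
--     for r in rss[1:]:
--         if [c for c, _ in r] != pattern:
--             return None
--
--     def select(xs, k):
--         # k-th smallest (0-based) of non-empty xs, by quickselect
--         p = xs[0]
--         lt = [x for x in xs if x < p]
--         if k < len(lt):
--             return select(lt, k)
--         eq = sum(1 for x in xs if x == p)
--         if k < len(lt) + eq:
--             return p
--         return select([x for x in xs if x > p], k - len(lt) - eq)
--
--     total = 0
--     for i in range(len(pattern)):
--         col = [r[i][1] for r in rss]
--         m = select(col, len(col) // 2)
--         total += sum(abs(x - m) for x in col)
--     return total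
-- ===== Notes on version B (the rewrite author's own statement) =====
-- stated objective: alternative
-- what changed: B run-length-encodes each string in one manual pass and compares patterns against the first string (instead of groupby + a set of canonical strings), and per run position computes the answer as the sum of absolute deviations from a quickselect-found median instead of sorting each column and pairing opposite ends.
import Mathlib
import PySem

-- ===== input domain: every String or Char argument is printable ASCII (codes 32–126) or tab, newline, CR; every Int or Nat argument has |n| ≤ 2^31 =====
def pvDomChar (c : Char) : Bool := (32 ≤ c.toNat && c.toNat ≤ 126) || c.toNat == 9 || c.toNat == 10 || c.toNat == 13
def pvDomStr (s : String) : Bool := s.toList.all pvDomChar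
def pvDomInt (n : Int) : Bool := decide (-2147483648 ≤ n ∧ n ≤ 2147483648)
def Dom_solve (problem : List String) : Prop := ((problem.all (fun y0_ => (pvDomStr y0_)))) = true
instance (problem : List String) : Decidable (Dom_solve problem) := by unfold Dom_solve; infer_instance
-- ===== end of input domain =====

-- B re-implements A with a one-pass run-length encoding (no groupby/set of canonical
-- strings) and, per run position, a quickselect median plus sum of absolute deviations
-- instead of sorting each column and pairing opposite ends (objective: alternative).

-- ===== PORT A =====
-- itertools.groupby: consecutive runs as (key, group) pairs
def pvGroupby : List Char → List (Char × List Char)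
  | [] => []
  | c :: rest =>
    match pvGroupby rest with
    | [] => [(c, [c])]
    | (d, g) :: gs => if c = d then (d, c :: g) :: gs else (c, [c]) :: (d, g) :: gs

def pvCanonical (l : List Char) : List Char := (pvGroupby l).map Prod.fst
def pvGroupLengths (l : List Char) : List Int := (pvGroupby l).map (fun p => (p.2.length : Int))

-- moves_count: rs[-1-i] / rs[i] are always in range on reached iterations, so getD 0
-- only totalises the pyGet? option and is never the result
def pvMovesCount (rs : List Int) : Int :=
  let srt := PySem.List.sorted rs (fun x => x) false
  (PySem.List.pyRange 0 (PySem.Int.floordiv (srt.length : Int) 2) 1).foldl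
    (fun ans i => ans + (((PySem.List.pyGet? srt (-1 - i)).getD 0) - ((PySem.List.pyGet? srt i).getD 0))) 0

def solve (problem : List String) : Option Int :=
  let canonicalStrings : PySem.Set (List Char) := PySem.Set.ofList (problem.map (fun s => pvCanonical s.toList))
  if canonicalStrings.length ≠ 1 then none
  else
    -- set.pop() on the (guarded) one-element set: its single element
    let s0 := canonicalStrings.headD []
    let gs := problem.map (fun s => pvGroupLengths s.toList)
    some ((PySem.List.pyRange 0 (s0.length : Int) 1).foldl
      (fun ans i => ans + pvMovesCount (gs.map (fun g => (PySem.List.pyGet? g i).getD 0))) 0)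

-- ===== PORT B =====
-- Source B runs(s): run-length encoding (char, count)
def pvRuns : List Char → List (Char × Int)
  | [] => []
  | c :: rest =>
    match pvRuns rest with
    | (d, k) :: t => if c = d then (c, k + 1) :: t else (c, 1) :: (d, k) :: t
    | [] => [(c, 1)]

-- Source B select(xs, k): quickselect; only ever called on non-empty xs, [] is a junk case
def pvSelect : List Int → Int → Int
  | [], _ => 0
  | p :: rest, k =>
    if k < (((p :: rest).filter (fun x => decide (x < p))).length : Int) then
      pvSelect ((p :: rest).filter (fun x => decide (x < p))) k
    else if k < (((p :: rest).filter (fun x => decide (x < p))).length : Int)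
             + (((p :: rest).filter (fun x => x == p)).length : Int) then p
    else
      pvSelect ((p :: rest).filter (fun x => decide (p < x)))
        (k - ((p :: rest).filter (fun x => decide (x < p))).length
           - ((p :: rest).filter (fun x => x == p)).length)
termination_by xs _ => xs.length
decreasing_by
  · exact List.length_filter_lt_length_iff_exists.mpr ⟨p, by simp⟩
  · exact List.length_filter_lt_length_iff_exists.mpr ⟨p, by simp⟩

def solve_alt (problem : List String) : Option Int :=
  let rss := problem.map (fun s => pvRuns s.toList)
  match rss with
  | [] => none
  | r0 :: rts =>
    let pattern := r0.map Prod.fst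
    if rts.all (fun r => r.map Prod.fst == pattern) then
      some ((List.range pattern.length).foldl (fun tot i =>
        let col := rss.map (fun r => (r.map Prod.snd).getD i 0)
        let m := pvSelect col ((col.length / 2 : Nat) : Int)
        tot + (col.map (fun x => |x - m|)).sum) 0)
    else none

-- ===== PRECONDITION & SPEC =====
def Spec_solve (problem : List String) (out : Option Int) : Prop := out = solve_alt problem
instance (problem : List String) (out : Option Int) : Decidable (Spec_solve problem out) := by unfold Spec_solve; infer_instance

-- ===== CLAIM (what is proved, stated in full; the proofs are below) =====
def Claim_equal_solve : Prop := ∀ (problem : List String), Dom_solve problem → Spec_solve problem (solve problem)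

-- ===== LEMMAS AND PROOFS =====

theorem range_map_sum (n : ℕ) (f : ℕ → ℤ) : ((List.range n).map f).sum = ∑ i ∈ Finset.range n, f i := by
  induction n with
  | zero => simp
  | succ m ihm => rw [List.range_succ, Finset.sum_range_succ]; simp [ihm]

theorem map_getD_range (s : List ℤ) : (List.range s.length).map (fun i => s.getD i 0) = s := by
  apply List.ext_getElem
  · simp
  · intro i h1 h2
    simp [List.getD_eq_getElem?_getD, List.getElem?_eq_getElem h2]

theorem pairing_eq_absdev (s : List ℤ) (hp : List.Pairwise (· ≤ ·) s) (hn : 0 < s.length) :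
    (∑ i ∈ Finset.range (s.length / 2), (s.getD (s.length - 1 - i) 0 - s.getD i 0))
      = ∑ i ∈ Finset.range s.length, |s.getD i 0 - s.getD (s.length / 2) 0| := by
  set g : ℕ → ℤ := fun i => s.getD i 0 with hg
  set n := s.length with hnn
  set k := n / 2 with hk
  have hkn : k < n := Nat.div_lt_self hn (by norm_num)
  set m := g k with hm
  have hmono : ∀ i j, i ≤ j → j < n → g i ≤ g j := by
    intro i j hij hj
    rcases eq_or_lt_of_le hij with rfl | h
    · exact le_refl _
    · have := (List.pairwise_iff_getElem.mp hp) i j (lt_of_le_of_lt hij hj) hj h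
      rw [hg]
      simp only []
      rw [List.getD_eq_getElem s 0 (by omega), List.getD_eq_getElem s 0 (by omega)]
      exact this
  -- LHS
  have hrefl : ∑ i ∈ Finset.range k, g (n - 1 - i) = ∑ j ∈ Finset.range k, g (n - k + j) := by
    rw [← Finset.sum_range_reflect (fun j => g (n - k + j)) k]
    refine Finset.sum_congr rfl ?_
    intro i hi
    have hik := Finset.mem_range.mp hi
    congr 1
    omega
  have hLHS : (∑ i ∈ Finset.range k, (g (n - 1 - i) - g i))
      = (∑ j ∈ Finset.range k, g (n - k + j)) - ∑ i ∈ Finset.range k, g i := by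
    rw [Finset.sum_sub_distrib, hrefl]
  -- RHS split
  have hsplit : (∑ i ∈ Finset.range n, |g i - m|)
      = (∑ i ∈ Finset.range k, (m - g i)) + ∑ i ∈ Finset.Ico k n, (g i - m) := by
    rw [Finset.range_eq_Ico, ← Finset.sum_Ico_consecutive _ (Nat.zero_le k) (le_of_lt hkn), ← Finset.range_eq_Ico]
    congr 1
    · refine Finset.sum_congr rfl ?_
      intro i hi
      have hik := Finset.mem_range.mp hi
      rw [abs_of_nonpos (by have := hmono i k (le_of_lt hik) hkn; omega)]
      ring
    · refine Finset.sum_congr rfl ?_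
      intro i hi
      have := Finset.mem_Ico.mp hi
      rw [abs_of_nonneg (by have := hmono k i this.1 this.2; omega)]
  have hIco : ∑ i ∈ Finset.Ico k n, (g i - m) = ∑ j ∈ Finset.range (n - k), (g (k + j) - m) :=
    Finset.sum_Ico_eq_sum_range (fun i => g i - m) k n
  rw [hLHS, hsplit, hIco]
  have hconst : ∀ (t : ℕ), ∑ _i ∈ Finset.range t, m = (t : ℤ) * m := by
    intro t; rw [Finset.sum_const, Finset.card_range]; ring
  rcases Nat.even_or_odd n with he | ho
  · have hek : n - k = k := by obtain ⟨t, ht⟩ := he; omega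
    rw [hek]
    rw [Finset.sum_sub_distrib, Finset.sum_sub_distrib, hconst]
    have hc : ∑ x ∈ Finset.range k, g (k + x) = ∑ x ∈ Finset.range k, g (n - k + x) :=
      Finset.sum_congr rfl (fun i _ => by congr 1; omega)
    rw [hc]; ring
  · have hok : n - k = k + 1 := by
      obtain ⟨t, ht⟩ := ho; omega
    rw [hok, Finset.sum_range_succ' (fun j => g (k + j) - m) k]
    have h0 : g (k + 0) - m = 0 := by simp [hm]
    rw [h0, Finset.sum_sub_distrib, Finset.sum_sub_distrib, hconst]
    have hc1 : ∑ j ∈ Finset.range k, g (k + 1 + j) = ∑ x ∈ Finset.range k, g (k + (x + 1)) :=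
      Finset.sum_congr rfl (fun i _ => by congr 1; omega)
    rw [hc1]; ring

theorem perm3 (xs : List ℤ) (p : ℤ) :
    (xs.filter (fun x => decide (x < p)) ++ (List.replicate (xs.count p) p ++ xs.filter (fun x => decide (p < x)))).Perm xs := by
  induction xs with
  | nil => simp
  | cons x t ih =>
    rcases lt_trichotomy x p with h | h | h
    · have h1 : x ≠ p := ne_of_lt h
      have h2 : ¬ p < x := not_lt_of_gt h
      simp only [List.filter_cons, List.count_cons, h, decide_true, h2, decide_false,
        if_false, beq_iff_eq, h1, if_true, List.cons_append]
      simpa using ih.cons x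
    · subst h
      have h2 : ¬ x < x := lt_irrefl x
      simp only [List.filter_cons, List.count_cons, h2, decide_false, beq_self_eq_true,
        if_true, List.replicate_succ]
      exact (List.perm_middle.trans (ih.cons x))
    · have h1 : x ≠ p := ne_of_gt h
      have h2 : ¬ x < p := not_lt_of_gt h
      simp only [List.filter_cons, List.count_cons, h, decide_true, h2, decide_false,
        if_false, beq_iff_eq, h1, if_true]
      have : (t.filter (fun x => decide (x < p)) ++ (List.replicate (t.count p) p ++ x :: t.filter (fun x => decide (p < x)))).Perm
          (x :: (t.filter (fun x => decide (x < p)) ++ (List.replicate (t.count p) p ++ t.filter (fun x => decide (p < x))))) := by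
        rw [← List.append_assoc, ← List.append_assoc]
        simpa using (List.perm_middle (a := x)
          (l₁ := t.filter (fun x => decide (x < p)) ++ List.replicate (t.count p) p)
          (l₂ := t.filter (fun x => decide (p < x))))
      exact this.trans (ih.cons x)

theorem sorted_part (xs : List ℤ) (p : ℤ) :
    PySem.List.sorted xs (fun x => x) false =
      PySem.List.sorted (xs.filter (fun x => decide (x < p))) (fun x => x) false
      ++ (List.replicate (xs.count p) p
      ++ PySem.List.sorted (xs.filter (fun x => decide (p < x))) (fun x => x) false) := by
  apply PySem.List.sorted_id_eq_of_perm_of_pairwise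
  · refine List.Perm.trans ?_ (perm3 xs p)
    exact ((PySem.List.sorted_perm _ _ _).append ((List.Perm.refl _).append (PySem.List.sorted_perm _ _ _)))
  · rw [List.pairwise_append]
    refine ⟨by simpa using PySem.List.sorted_pairwise (xs.filter (fun x => decide (x < p))) (fun x => x), ?_, ?_⟩
    · rw [List.pairwise_append]
      refine ⟨List.pairwise_replicate.mpr (by simp), by simpa using PySem.List.sorted_pairwise (xs.filter (fun x => decide (p < x))) (fun x => x), ?_⟩
      · intro a ha b hb
        have hpa : a = p := (List.eq_of_mem_replicate ha)
        have hb' : b ∈ xs.filter (fun x => decide (p < x)) := (PySem.List.mem_sorted _ _ _ _).mp hb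
        have := (List.mem_filter.mp hb').2
        simp at this
        omega
    · intro a ha b hb
      have ha' : a ∈ xs.filter (fun x => decide (x < p)) := (PySem.List.mem_sorted _ _ _ _).mp ha
      have hap := (List.mem_filter.mp ha').2
      simp at hap
      rcases List.mem_append.mp hb with hb1 | hb2
      · have := List.eq_of_mem_replicate hb1; omega
      · have hb' : b ∈ xs.filter (fun x => decide (p < x)) := (PySem.List.mem_sorted _ _ _ _).mp hb2
        have := (List.mem_filter.mp hb').2
        simp at this
        omega

theorem count_eq_filter_len (xs : List ℤ) (p : ℤ) : (xs.filter (fun x => x == p)).length = xs.count p := by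
  simp [List.count, ← List.countP_eq_length_filter]

theorem pvSelect_correct : ∀ (N : ℕ) (xs : List ℤ), xs.length ≤ N → ∀ (k : ℕ), k < xs.length →
    pvSelect xs (k : ℤ) = (PySem.List.sorted xs (fun x => x) false).getD k 0 := by
  intro N
  induction N with
  | zero => intro xs h k hk; omega
  | succ n ih =>
    intro xs hN k hk
    match xs with
    | [] => simp at hk
    | p :: rest =>
      rw [pvSelect]
      have hcnt' : ((p :: rest).filter (fun x => x == p)).length = (p :: rest).count p :=
        count_eq_filter_len _ _
      have hlen : ((p :: rest).filter (fun x => decide (x < p))).length + (p :: rest).count p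
          + ((p :: rest).filter (fun x => decide (p < x))).length = (p :: rest).length := by
        have := (perm3 (p :: rest) p).length_eq
        simp only [List.length_append, List.length_replicate] at this
        omega
      have hltlen : ((p :: rest).filter (fun x => decide (x < p))).length < (p :: rest).length :=
        List.length_filter_lt_length_iff_exists.mpr ⟨p, by simp⟩
      have hgtlen : ((p :: rest).filter (fun x => decide (p < x))).length < (p :: rest).length :=
        List.length_filter_lt_length_iff_exists.mpr ⟨p, by simp⟩
      rw [sorted_part (p :: rest) p]
      by_cases h1 : (k : ℤ) < (((p :: rest).filter (fun x => decide (x < p))).length : ℤ)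
      · rw [if_pos h1]
        have hk1 : k < ((p :: rest).filter (fun x => decide (x < p))).length := by exact_mod_cast h1
        rw [ih _ (by omega) k hk1]
        rw [List.getD_append _ _ _ _ (by rw [PySem.List.length_sorted]; exact hk1)]
      · rw [if_neg h1]
        have hk1 : ((p :: rest).filter (fun x => decide (x < p))).length ≤ k := by
          exact_mod_cast not_lt.mp h1
        by_cases h2 : (k : ℤ) < (((p :: rest).filter (fun x => decide (x < p))).length : ℤ)
            + (((p :: rest).filter (fun x => x == p)).length : ℤ)
        · rw [if_pos h2]
          have hk2 : k < ((p :: rest).filter (fun x => decide (x < p))).length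
              + ((p :: rest).filter (fun x => x == p)).length := by exact_mod_cast h2
          rw [List.getD_append_right _ _ _ _ (by rw [PySem.List.length_sorted]; exact hk1)]
          rw [PySem.List.length_sorted]
          rw [List.getD_append _ _ _ _ (by rw [List.length_replicate]; omega)]
          rw [List.getD_replicate _ (by omega)]
        · rw [if_neg h2]
          have hk2 : ((p :: rest).filter (fun x => decide (x < p))).length
              + ((p :: rest).filter (fun x => x == p)).length ≤ k := by
            exact_mod_cast not_lt.mp h2
          have hcast : (k : ℤ) - (((p :: rest).filter (fun x => decide (x < p))).length : ℤ)
              - (((p :: rest).filter (fun x => x == p)).length : ℤ)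
              = ((k - ((p :: rest).filter (fun x => decide (x < p))).length
                  - ((p :: rest).filter (fun x => x == p)).length : ℕ) : ℤ) := by
            omega
          rw [hcast]
          have hklt : k - ((p :: rest).filter (fun x => decide (x < p))).length
              - ((p :: rest).filter (fun x => x == p)).length
              < ((p :: rest).filter (fun x => decide (p < x))).length := by omega
          rw [ih _ (by omega) _ hklt]
          rw [List.getD_append_right _ _ _ _ (by rw [PySem.List.length_sorted]; exact hk1)]
          rw [PySem.List.length_sorted]
          rw [List.getD_append_right _ _ _ _ (by rw [List.length_replicate]; omega)]
          rw [List.length_replicate]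
          congr 1
          omega

theorem movesA_sum (c : List ℤ) :
    pvMovesCount c = ∑ i ∈ Finset.range (c.length / 2),
      ((PySem.List.sorted c (fun x => x) false).getD (c.length - 1 - i) 0
        - (PySem.List.sorted c (fun x => x) false).getD i 0) := by
  set s := PySem.List.sorted c (fun x => x) false with hs
  have hlen : s.length = c.length := PySem.List.length_sorted _ _ _
  have h2 : ((2:ℤ)) = ((2:ℕ):ℤ) := by norm_num
  simp only [pvMovesCount, ← hs, hlen, h2, PySem.Int.floordiv_natCast]
  rw [PySem.List.pyRange_one, PySem.List.foldl_add, List.map_map]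
  have htoNat : ((c.length / 2 : ℕ) : ℤ) - 0 = ((c.length / 2 : ℕ) : ℤ) := by ring
  rw [htoNat, Int.toNat_natCast]
  have hmap : ∀ i ∈ List.range (c.length / 2),
      (((fun ans => (PySem.List.pyGet? s (-1 - ans)).getD 0 - (PySem.List.pyGet? s ans).getD 0) ∘ fun k => (0:ℤ) + ↑k) i)
      = s.getD (c.length - 1 - i) 0 - s.getD i 0 := by
    intro i hi
    have hi' : i < c.length / 2 := List.mem_range.mp hi
    have hin : i < c.length := by omega
    simp only [Function.comp, zero_add]
    have hneg : (-1 - (i:ℤ)) = -((i+1 : ℕ) : ℤ) := by push_cast; ring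
    rw [hneg, PySem.List.pyGet?_neg_natCast s (i+1) (by omega) (by omega), PySem.List.pyGet?_natCast]
    have : s.length - (i + 1) = c.length - 1 - i := by omega
    rw [this]
    simp [List.getD_eq_getElem?_getD]
  rw [List.map_congr_left hmap, zero_add, range_map_sum]

theorem prefix_foldl_add {α : Type} [BEq α] : ∀ (xs : List α) (s : PySem.Set α),
    s <+: xs.foldl PySem.Set.add s := by
  intro xs
  induction xs with
  | nil => intro s; simp
  | cons y t ih =>
    intro s
    refine List.IsPrefix.trans ?_ (ih (PySem.Set.add s y))
    simp only [PySem.Set.add]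
    split
    · exact List.prefix_refl s
    · exact ⟨[y], rfl⟩

theorem foldl_add_singleton {α : Type} [BEq α] [LawfulBEq α] : ∀ (xs : List α) (x : α),
    (xs.foldl PySem.Set.add [x] = [x] ↔ ∀ y ∈ xs, y = x) := by
  intro xs
  induction xs with
  | nil => intro x; simp
  | cons y t ih =>
    intro x
    by_cases hyx : y = x
    · subst hyx
      have hadd : PySem.Set.add [y] y = [y] := by
        have hc : PySem.Set.contains [y] y = true := by simp [PySem.Set.contains]
        unfold PySem.Set.add
        rw [hc]
        simp
      simp only [List.foldl_cons, hadd, ih, List.forall_mem_cons]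
      exact ⟨fun h => ⟨by simp, h⟩, fun h => h.2⟩
    · have hadd : PySem.Set.add [x] y = [x, y] := by
        have hc : PySem.Set.contains [x] y = false := by
          simp [PySem.Set.contains]
          exact fun h => absurd h hyx
        unfold PySem.Set.add
        rw [hc]
        simp
      simp only [List.foldl_cons, hadd]
      constructor
      · intro h
        exfalso
        have hpre := prefix_foldl_add t [x, y]
        have := hpre.length_le
        rw [h] at this
        simp at this
      · intro h
        exact absurd (h y (by simp)) hyx

theorem ofList_cons_eq {α : Type} [BEq α] (x : α) (xs : List α) :
    PySem.Set.ofList (x :: xs) = xs.foldl PySem.Set.add [x] := by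
  rw [PySem.Set.ofList_eq_foldl]
  rfl

theorem ofList_len_one_iff {α : Type} [BEq α] [LawfulBEq α] (x : α) (xs : List α) :
    ((PySem.Set.ofList (x :: xs)).length = 1 ↔ ∀ y ∈ xs, y = x) := by
  rw [ofList_cons_eq]
  constructor
  · intro h
    have hpre := prefix_foldl_add xs [x]
    have heq : [x] = xs.foldl PySem.Set.add [x] := hpre.eq_of_length (by simpa using h.symm)
    exact (foldl_add_singleton xs x).mp heq.symm
  · intro h
    rw [(foldl_add_singleton xs x).mpr h]
    rfl

theorem ofList_eq_singleton {α : Type} [BEq α] [LawfulBEq α] (x : α) (xs : List α)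
    (h : ∀ y ∈ xs, y = x) : PySem.Set.ofList (x :: xs) = [x] := by
  rw [ofList_cons_eq]
  exact (foldl_add_singleton xs x).mpr h


theorem sumB_eq (c : List ℤ) (m : ℤ) :
    (c.map (fun x => |x - m|)).sum
      = ∑ i ∈ Finset.range c.length, |(PySem.List.sorted c (fun x => x) false).getD i 0 - m| := by
  have hperm : (PySem.List.sorted c (fun x => x) false).Perm c := PySem.List.sorted_perm _ _ _
  rw [← ((hperm.map (fun x => |x - m|)).sum_eq)]
  conv_lhs => rw [← map_getD_range (PySem.List.sorted c (fun x => x) false)]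
  rw [List.map_map, range_map_sum, PySem.List.length_sorted]
  rfl

theorem moves_eq_absdev (c : List ℤ) :
    pvMovesCount c = (c.map (fun x => |x - pvSelect c ((c.length / 2 : ℕ) : ℤ)|)).sum := by
  rcases eq_or_ne c [] with rfl | hc
  · rfl
  · have hn : 0 < c.length := List.length_pos_of_ne_nil hc
    have hsel : pvSelect c ((c.length / 2 : ℕ) : ℤ)
        = (PySem.List.sorted c (fun x => x) false).getD (c.length / 2) 0 :=
      pvSelect_correct c.length c le_rfl (c.length / 2) (Nat.div_lt_self hn (by norm_num))
    rw [movesA_sum, sumB_eq, hsel]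
    have hp : List.Pairwise (· ≤ ·) (PySem.List.sorted c (fun x => x) false) := by
      simpa using PySem.List.sorted_pairwise c (fun x => x)
    have hmain := pairing_eq_absdev (PySem.List.sorted c (fun x => x) false) hp
      (by rw [PySem.List.length_sorted]; exact hn)
    rw [PySem.List.length_sorted] at hmain
    exact hmain

theorem pvRuns_eq : ∀ l : List Char, pvRuns l = (pvGroupby l).map (fun p => (p.1, (p.2.length : Int))) := by
  intro l
  induction l with
  | nil => rfl
  | cons c rest ih =>
    cases hg : pvGroupby rest with
    | nil =>
      have hr : pvRuns rest = [] := by rw [ih, hg]; rfl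
      simp [pvRuns, pvGroupby, hg, hr]
    | cons p gs =>
      obtain ⟨d, g⟩ := p
      have hr : pvRuns rest = (d, (g.length : Int)) :: gs.map (fun p => (p.1, (p.2.length : Int))) := by
        rw [ih, hg]; rfl
      by_cases hcd : c = d
      · subst hcd
        simp [pvRuns, pvGroupby, hg, hr]
      · simp [pvRuns, pvGroupby, hg, hr, hcd]

theorem runs_fst (l : List Char) : (pvRuns l).map Prod.fst = pvCanonical l := by
  rw [pvRuns_eq, pvCanonical, List.map_map]
  rfl

theorem runs_snd (l : List Char) : (pvRuns l).map Prod.snd = pvGroupLengths l := by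
  rw [pvRuns_eq, pvGroupLengths, List.map_map]
  rfl

theorem pyGetD_nat (g : List Int) (i : Nat) : (PySem.List.pyGet? g (i : Int)).getD 0 = g.getD i 0 := by
  rw [PySem.List.pyGet?_natCast, List.getD_eq_getElem?_getD]

theorem body_eq (ts : List String) (i : Nat) :
    pvMovesCount (ts.map (fun t => (PySem.List.pyGet? (pvGroupLengths t.toList) (i : Int)).getD 0))
      = ((ts.map (fun t => ((pvRuns t.toList).map Prod.snd).getD i 0)).map
          (fun x => |x - pvSelect (ts.map (fun t => ((pvRuns t.toList).map Prod.snd).getD i 0))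
            (((ts.map (fun t => ((pvRuns t.toList).map Prod.snd).getD i 0)).length / 2 : Nat) : Int)|)).sum := by
  have hcol : ts.map (fun t => (PySem.List.pyGet? (pvGroupLengths t.toList) (i : Int)).getD 0)
      = ts.map (fun t => ((pvRuns t.toList).map Prod.snd).getD i 0) := by
    apply List.map_congr_left
    intro t _
    rw [runs_snd, pyGetD_nat]
  rw [hcol]
  exact moves_eq_absdev _

theorem solve_eq_alt (problem : List String) : solve problem = solve_alt problem := by
  cases problem with
  | nil => rfl
  | cons s rest =>
    by_cases hall : ∀ t ∈ rest, pvCanonical t.toList = pvCanonical s.toList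
    · have hset : PySem.Set.ofList ((s :: rest).map (fun t => pvCanonical t.toList)) = [pvCanonical s.toList] := by
        rw [List.map_cons]
        refine ofList_eq_singleton _ _ ?_
        intro y hy
        obtain ⟨t, ht, rfl⟩ := List.mem_map.mp hy
        exact hall t ht
      have hallB : (rest.map (fun t => pvRuns t.toList)).all
          (fun r => r.map Prod.fst == (pvRuns s.toList).map Prod.fst) = true := by
        rw [List.all_eq_true]
        intro r hr
        obtain ⟨t, ht, rfl⟩ := List.mem_map.mp hr
        rw [beq_iff_eq, runs_fst, runs_fst]
        exact hall t ht
      simp only [solve, solve_alt, List.map_cons, hallB]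
      have hset' : PySem.Set.ofList (pvCanonical s.toList :: List.map (fun t => pvCanonical t.toList) rest)
          = [pvCanonical s.toList] := by
        refine ofList_eq_singleton _ _ ?_
        intro y hy
        obtain ⟨t, ht, rfl⟩ := List.mem_map.mp hy
        exact hall t ht
      rw [hset']
      rw [if_neg (by simp)]
      rw [if_pos trivial]
      simp only [List.headD_cons]
      rw [runs_fst]
      congr 1
      rw [PySem.List.foldl_add, PySem.List.foldl_add]
      congr 1
      rw [PySem.List.pyRange_one]
      have hz : ((pvCanonical s.toList).length : Int) - 0 = ((pvCanonical s.toList).length : Int) := sub_zero _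
      rw [hz, Int.toNat_natCast, List.map_map]
      apply congrArg List.sum
      apply List.map_congr_left
      intro i hi
      simp only [Function.comp, zero_add]
      simp only [List.map_map, Function.comp_def]
      have hb := body_eq (s :: rest) i
      simp only [List.map_cons, List.map_map, Function.comp_def] at hb
      exact hb
    · rw [not_forall] at hall
      simp only [not_forall, exists_prop] at hall
      obtain ⟨t, ht, hne⟩ := hall
      have hlen : (PySem.Set.ofList ((s :: rest).map (fun u => pvCanonical u.toList))).length ≠ 1 := by
        rw [List.map_cons]
        intro h
        exact hne ((ofList_len_one_iff _ _).mp h _ (List.mem_map_of_mem ht))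
      have hallB : (rest.map (fun u => pvRuns u.toList)).all
          (fun r => r.map Prod.fst == (pvRuns s.toList).map Prod.fst) = false := by
        rw [List.all_eq_false]
        refine ⟨pvRuns t.toList, List.mem_map_of_mem ht, ?_⟩
        rw [Bool.not_eq_true, beq_eq_false_iff_ne, ne_eq, runs_fst, runs_fst]
        exact hne
      simp only [solve, solve_alt, List.map_cons, hallB]
      rw [if_pos (by simpa using hlen)]
      simp

-- ===== VERDICT (by name: the statement is the Claim_ definition above) =====
theorem solve_spec : Claim_equal_solve := by
  intro problem _
  unfold Spec_solve
  exact solve_eq_alt problem
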